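-- pv_equiv track=rewrite | github.com/valeradyomin/cw4_jobs_parser | classes/vacancy.py | slice_string
-- ===== SOURCE A (Python) =====
-- def slice_string(string, num_spaces):
--     """
--     Обрезает строку до указанного количества пробелов.
--
--     Аргументы:
--         string (str): Исходная строка.
--         num_spaces (int): Количество пробелов для обрезки.
--
--     Возвращает:
--         str: Обрезанная строка.
--     """
--     if not string:
--         return ""
--
--     count = 0
--     result = ""
--     for char in string:
--         if char == " ":
--             count += 1
--         if count <= num_spaces:
--             result += char
--         else:
--             break
--     return result
-- ===== SOURCE B (Python) =====
-- def slice_string(string, num_spaces):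
--     """Truncate string just before the (num_spaces+1)-th space via split/slice/join."""
--     return " ".join(string.split(" ")[:max(0, num_spaces + 1)])
-- ===== Notes on version B (the rewrite author's own statement) =====
-- stated objective: idiomatic
-- what changed: Replaced the per-character loop with a running space counter, repeated string concatenation and break by a one-line split(" ")/slice/join pipeline with the slice bound clamped to 0.
import Mathlib
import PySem

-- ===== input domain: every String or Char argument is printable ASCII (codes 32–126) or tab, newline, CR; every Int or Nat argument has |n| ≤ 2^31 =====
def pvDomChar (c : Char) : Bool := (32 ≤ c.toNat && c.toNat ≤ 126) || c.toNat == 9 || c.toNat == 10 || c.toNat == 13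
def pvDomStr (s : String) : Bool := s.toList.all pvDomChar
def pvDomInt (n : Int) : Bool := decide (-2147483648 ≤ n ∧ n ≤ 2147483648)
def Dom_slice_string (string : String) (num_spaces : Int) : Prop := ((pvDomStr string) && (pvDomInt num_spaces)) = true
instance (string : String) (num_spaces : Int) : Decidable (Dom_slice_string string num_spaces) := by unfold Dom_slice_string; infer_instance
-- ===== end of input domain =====

-- B replaces A's per-character counting loop with a split(" ")/slice/join pipeline (idiomatic; same result).

-- ===== PORT A =====
-- the for-loop with `count`, `result` and `break`: structural recursion over the characters
def sliceStringLoop : List Char → Int → Int → List Char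
  | [], _, _ => []
  | c :: rest, count, num_spaces =>
    let count' := if c = ' ' then count + 1 else count
    if count' ≤ num_spaces then c :: sliceStringLoop rest count' num_spaces
    else []

def slice_string (string : String) (num_spaces : Int) : String :=
  if string.toList = [] then ""                               -- `if not string: return ""`
  else String.mk (sliceStringLoop string.toList 0 num_spaces)

-- ===== PORT B =====
-- " ".join(string.split(" ")[:max(0, num_spaces + 1)])  — the slice bound is ≥ 0, so it is List.take
def slice_string_alt (string : String) (num_spaces : Int) : String :=
  String.mk (PySem.Chars.join [' ']
    ((PySem.Chars.splitOn string.toList [' ']).take (max 0 (num_spaces + 1)).toNat))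

-- ===== PRECONDITION & SPEC =====
def Spec_slice_string (string : String) (num_spaces : Int) (out : String) : Prop := out = slice_string_alt string num_spaces
instance (string : String) (num_spaces : Int) (out : String) : Decidable (Spec_slice_string string num_spaces out) := by unfold Spec_slice_string; infer_instance

-- ===== CLAIM (what is proved, stated in full; the proofs are below) =====
def Claim_equal_slice_string : Prop := ∀ (string : String) (num_spaces : Int), Dom_slice_string string num_spaces → Spec_slice_string string num_spaces (slice_string string num_spaces)

-- ===== LEMMAS AND PROOFS =====

-- reference single-char split, structurally recursive (proof-side only)
def refSplit : List Char → List (List Char)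
  | [] => [[]]
  | c :: rest => if c = ' ' then [] :: refSplit rest else (refSplit rest).modifyHead (c :: ·)

lemma refSplit_ne_nil : ∀ l : List Char, refSplit l ≠ []
  | [] => by simp [refSplit]
  | c :: rest => by
    simp only [refSplit]
    split_ifs
    · simp
    · cases h : refSplit rest with
      | nil => exact absurd h (refSplit_ne_nil rest)
      | cons a t => simp

lemma splitOn_go_spec (fuel : Nat) (l cur : List Char) (acc : List (List Char))
    (h : l.length < fuel) :
    PySem.Chars.splitOn.go [' '] fuel l cur acc
      = acc.reverse ++ (refSplit l).modifyHead (cur.reverse ++ ·) := by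
  induction l generalizing fuel cur acc with
  | nil =>
    cases fuel with
    | zero => omega
    | succ f => rw [PySem.Chars.splitOn.go.eq_def]; simp [refSplit]
  | cons c rest ih =>
    cases fuel with
    | zero => omega
    | succ f =>
      rw [PySem.Chars.splitOn.go.eq_def]
      simp only []
      by_cases hc : c = ' '
      · have hp : List.isPrefixOf [' '] (c :: rest) = true := by simp [hc, List.isPrefixOf]
        rw [if_pos hp]
        simp only [List.length_cons, List.drop_succ_cons, List.length_nil, List.drop_zero]
        rw [ih f [] (cur.reverse :: acc) (by simpa using Nat.lt_of_succ_lt_succ h)]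
        simp [refSplit, hc, List.modifyHead]
        cases hr : refSplit rest with
        | nil => exact absurd hr (refSplit_ne_nil rest)
        | cons a t => simp
      · have hp : List.isPrefixOf [' '] (c :: rest) = false := by
          simp [List.isPrefixOf]; exact fun hh => hc hh.symm
        rw [if_neg (by simp [hp])]
        rw [ih f (c :: cur) acc (by simpa using Nat.lt_of_succ_lt_succ h)]
        simp [refSplit, hc]
        cases hr : refSplit rest with
        | nil => exact absurd hr (refSplit_ne_nil rest)
        | cons a t => simp [List.modifyHead]

lemma splitOn_eq_refSplit (l : List Char) :
    PySem.Chars.splitOn l [' '] = refSplit l := by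
  unfold PySem.Chars.splitOn
  rw [splitOn_go_spec (l.length + 1) l [] [] (by omega)]
  cases hr : refSplit l with
  | nil => exact absurd hr (refSplit_ne_nil l)
  | cons a t => simp [List.modifyHead]

lemma loop_eq_joinTake (l : List Char) (count num_spaces : Int) :
    sliceStringLoop l count num_spaces
      = PySem.Chars.join [' ']
          ((refSplit l).take (max 0 (num_spaces - count + 1)).toNat) := by
  induction l generalizing count with
  | nil =>
    cases hk : (max 0 (num_spaces - count + 1)).toNat with
    | zero => simp [sliceStringLoop, refSplit, PySem.Chars.join_nil]
    | succ k => simp [sliceStringLoop, refSplit, PySem.Chars.join_singleton]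
  | cons c rest ih =>
    simp only [sliceStringLoop]
    by_cases hc : c = ' '
    · simp only [if_pos hc]
      by_cases hle : count + 1 ≤ num_spaces
      · rw [if_pos hle, ih (count + 1)]
        have h1 : (max 0 (num_spaces - count + 1)).toNat
            = (max 0 (num_spaces - (count + 1) + 1)).toNat + 1 := by omega
        rw [h1]
        simp only [refSplit, if_pos hc, List.take_succ_cons]
        have h2 : 1 ≤ (max 0 (num_spaces - (count + 1) + 1)).toNat := by omega
        cases hr : refSplit rest with
        | nil => exact absurd hr (refSplit_ne_nil rest)
        | cons t0 ts =>
          obtain ⟨k, hk⟩ : ∃ k, (max 0 (num_spaces - (count + 1) + 1)).toNat = k + 1 :=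
            ⟨_, (Nat.succ_pred_eq_of_pos h2).symm⟩
          rw [hk]
          simp only [List.take_succ_cons]
          rw [PySem.Chars.join_cons_cons]
          simp [hc]
      · rw [if_neg hle]
        have : (max 0 (num_spaces - count + 1)).toNat = 0 ∨
               (max 0 (num_spaces - count + 1)).toNat = 1 := by omega
        simp only [refSplit, if_pos hc]
        rcases this with h | h <;>
          simp [h, PySem.Chars.join_nil, PySem.Chars.join_singleton]
    · simp only [if_neg hc]
      by_cases hle : count ≤ num_spaces
      · rw [if_pos hle, ih count]
        have h1 : (max 0 (num_spaces - count + 1)).toNat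
            = (num_spaces - count).toNat + 1 := by omega
        rw [h1]
        simp only [refSplit, if_neg hc]
        cases hr : refSplit rest with
        | nil => exact absurd hr (refSplit_ne_nil rest)
        | cons t0 ts =>
          simp only [List.modifyHead, List.take_succ_cons]
          cases hts : ts.take (num_spaces - count).toNat with
          | nil => simp [PySem.Chars.join_singleton]
          | cons q0 qr =>
            rw [PySem.Chars.join_cons_cons, PySem.Chars.join_cons_cons]
            simp
      · rw [if_neg hle]
        have h0 : (max 0 (num_spaces - count + 1)).toNat = 0 := by omega
        simp [h0, PySem.Chars.join_nil]

-- ===== VERDICT (by name: the statement is the Claim_ definition above) =====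
theorem slice_string_spec : Claim_equal_slice_string := by
  intro s n _
  unfold Spec_slice_string slice_string slice_string_alt
  rw [splitOn_eq_refSplit]
  by_cases hs : s.toList = []
  · rw [if_pos hs, hs]
    have hj : PySem.Chars.join [' '] (List.take (max 0 (n + 1)).toNat (refSplit [])) = [] := by
      cases hk : (max 0 (n + 1)).toNat with
      | zero => simp [refSplit, PySem.Chars.join_nil]
      | succ k => simp [refSplit, PySem.Chars.join_singleton]
    rw [hj]
    rfl
  · rw [if_neg hs, loop_eq_joinTake]
    norm_num
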